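-- pv_equiv track=rewrite | github.com/iroxusux/ControlRox | controlrox/models/plc/protocols.py | _insert_branch_tokens
-- ===== SOURCE A (Python) =====
-- def _insert_branch_tokens(
--     original_tokens: list[str],
--     start_pos: int,
--     end_pos: int,
--     branch_instructions: list[str]
-- ) -> list[str]:
--     """Insert branch markers and instructions into token sequence.
--
--     Args:
--         original_tokens (List[str]): Original token sequence
--         start_pos (int): Start position for branch
--         end_pos (int): End position for branch
--         branch_instructions (List[str]): Instructions to place in branch
--
--     Returns:
--         List[str]: New token sequence with branch inserted
--     """
--     new_tokens = []
--
--     if end_pos < start_pos: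
--         raise ValueError("End position must be greater than or equal to start position!")
--
--     if not original_tokens:
--         original_tokens = ['']
--
--     def write_branch_end():
--         new_tokens.append(',')
--         for instr in branch_instructions:
--             new_tokens.append(instr)
--         new_tokens.append(']')
--
--     for index, token in enumerate(original_tokens):
--         if index == start_pos:
--             new_tokens.append('[')
--         if index == end_pos:
--             write_branch_end()
--         if token:
--             new_tokens.append(token)
--         if (end_pos == len(original_tokens) and index == len(original_tokens) - 1):
--             write_branch_end()
--
--     return new_tokens
-- ===== SOURCE B (Python) =====
-- def _insert_branch_tokens(
--     original_tokens: list[str],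
--     start_pos: int,
--     end_pos: int,
--     branch_instructions: list[str]
-- ) -> list[str]:
--     """Insert branch markers/instructions by concatenating index regions."""
--     if end_pos < start_pos:
--         raise ValueError("End position must be greater than or equal to start position!")
--
--     toks = original_tokens if original_tokens else ['']
--     n = len(toks)
--
--     left = [t for i, t in enumerate(toks) if i < start_pos and t]
--     mid = [t for i, t in enumerate(toks) if start_pos <= i < end_pos and t]
--     right = [t for i, t in enumerate(toks) if i >= end_pos and t]
--
--     open_marker = ['['] if 0 <= start_pos < n else []
--     branch_end = [','] + list(branch_instructions) + [']'] if 0 <= end_pos <= n else []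
--
--     return left + open_marker + mid + branch_end + right
-- ===== Notes on version B (the rewrite author's own statement) =====
-- stated objective: alternative
-- what changed: A interleaves markers and tokens in one indexed loop with per-index equality tests and a trailing special case; B partitions the tokens into three index regions (before start, start..end, after end) and concatenates region lists with the '[' marker and the branch-end block inserted once under closed-form range guards (0<=start<n, 0<=end<=n).
import Mathlib
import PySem

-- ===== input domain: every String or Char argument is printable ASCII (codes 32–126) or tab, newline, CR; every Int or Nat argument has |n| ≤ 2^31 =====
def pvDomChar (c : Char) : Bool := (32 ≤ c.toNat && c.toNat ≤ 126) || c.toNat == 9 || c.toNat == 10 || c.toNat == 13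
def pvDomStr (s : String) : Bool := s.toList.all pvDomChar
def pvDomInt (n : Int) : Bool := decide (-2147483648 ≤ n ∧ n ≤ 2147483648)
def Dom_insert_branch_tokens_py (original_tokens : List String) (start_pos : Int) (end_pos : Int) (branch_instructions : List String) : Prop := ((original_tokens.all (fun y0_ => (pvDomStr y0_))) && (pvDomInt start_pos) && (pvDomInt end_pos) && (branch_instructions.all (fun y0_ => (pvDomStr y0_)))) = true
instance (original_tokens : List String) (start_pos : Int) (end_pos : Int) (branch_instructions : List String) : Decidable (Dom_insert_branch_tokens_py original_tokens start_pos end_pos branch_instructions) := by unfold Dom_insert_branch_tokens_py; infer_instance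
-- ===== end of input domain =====

set_option maxHeartbeats 1600000


-- B replaces A's single interleaving indexed loop by a partition of the tokens into three index
-- regions, concatenated with the two markers inserted once under closed-form range guards
-- (objective: alternative; same cost).  Both programs raise ValueError when end_pos < start_pos,
-- which is exactly what Pre_ excludes.

-- ===== PORT A =====
-- helper `write_branch_end`: appends ',', each instruction in a loop, then ']' to the accumulator
def pvWriteBranchEnd (branch_instructions : List String) (new_tokens : List String) : List String :=
  (branch_instructions.foldl (fun acc instr => acc ++ [instr]) (new_tokens ++ [","])) ++ ["]"]


def insert_branch_tokens_py (original_tokens : List String) (start_pos : Int) (end_pos : Int) (branch_instructions : List String) : List String :=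
  if end_pos < start_pos then []  -- Python raises ValueError here; excluded by Pre_
  else
    let toks := if original_tokens = [] then [""] else original_tokens
    let n : Int := toks.length
    (PySem.List.enumerate toks).foldl (fun new_tokens p =>
      let new_tokens := if p.1 = start_pos then new_tokens ++ ["["] else new_tokens
      let new_tokens := if p.1 = end_pos then pvWriteBranchEnd branch_instructions new_tokens else new_tokens
      let new_tokens := if p.2 ≠ "" then new_tokens ++ [p.2] else new_tokens
      if end_pos = n ∧ p.1 = n - 1 then pvWriteBranchEnd branch_instructions new_tokens else new_tokens) []

-- ===== PORT B =====
def insert_branch_tokens_py_alt (original_tokens : List String) (start_pos : Int) (end_pos : Int) (branch_instructions : List String) : List String :=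
  if end_pos < start_pos then []  -- Python raises ValueError here too; excluded by Pre_
  else
    let toks := if original_tokens = [] then [""] else original_tokens
    let n : Int := toks.length
    let left := (PySem.List.enumerate toks).filterMap (fun p => if p.1 < start_pos ∧ p.2 ≠ "" then some p.2 else none)
    let mid := (PySem.List.enumerate toks).filterMap (fun p => if (start_pos ≤ p.1 ∧ p.1 < end_pos) ∧ p.2 ≠ "" then some p.2 else none)
    let right := (PySem.List.enumerate toks).filterMap (fun p => if end_pos ≤ p.1 ∧ p.2 ≠ "" then some p.2 else none)
    let openMarker := if 0 ≤ start_pos ∧ start_pos < n then ["["] else []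
    let branchEnd := if 0 ≤ end_pos ∧ end_pos ≤ n then [","] ++ branch_instructions ++ ["]"] else []
    left ++ openMarker ++ mid ++ branchEnd ++ right

-- ===== PRECONDITION & SPEC =====
-- Pre_ excludes exactly the inputs where Python A raises ValueError (end_pos < start_pos); B raises there too.
def Pre_insert_branch_tokens_py (original_tokens : List String) (start_pos : Int) (end_pos : Int) (branch_instructions : List String) : Prop :=
  start_pos ≤ end_pos
instance (original_tokens : List String) (start_pos : Int) (end_pos : Int) (branch_instructions : List String) : Decidable (Pre_insert_branch_tokens_py original_tokens start_pos end_pos branch_instructions) := by unfold Pre_insert_branch_tokens_py; infer_instance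

def pvWitness_insert_branch_tokens_py : List String × Int × Int × List String := (["XIC a", "OTE b"], 1, 2, ["XIO c"])

def Spec_insert_branch_tokens_py (original_tokens : List String) (start_pos : Int) (end_pos : Int) (branch_instructions : List String) (out : List String) : Prop := out = insert_branch_tokens_py_alt original_tokens start_pos end_pos branch_instructions
instance (original_tokens : List String) (start_pos : Int) (end_pos : Int) (branch_instructions : List String) (out : List String) : Decidable (Spec_insert_branch_tokens_py original_tokens start_pos end_pos branch_instructions out) := by unfold Spec_insert_branch_tokens_py; infer_instance

-- ===== CLAIM (what is proved, stated in full; the proofs are below) =====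
def Claim_equal_insert_branch_tokens_py : Prop := ∀ (original_tokens : List String) (start_pos : Int) (end_pos : Int) (branch_instructions : List String), Dom_insert_branch_tokens_py original_tokens start_pos end_pos branch_instructions → Pre_insert_branch_tokens_py original_tokens start_pos end_pos branch_instructions → Spec_insert_branch_tokens_py original_tokens start_pos end_pos branch_instructions (insert_branch_tokens_py original_tokens start_pos end_pos branch_instructions)

-- ===== LEMMAS AND PROOFS =====
theorem pvWriteBranchEnd_eq (instrs acc : List String) :
    pvWriteBranchEnd instrs acc = acc ++ [","] ++ instrs ++ ["]"] := by
  rw [pvWriteBranchEnd, PySem.List.foldl_append_singleton_eq_self]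


def pvStep (s e n : Int) (instrs : List String) (p : Int × String) : List String :=
  (if p.1 = s then ["["] else []) ++ (if p.1 = e then [","] ++ instrs ++ ["]"] else [])
    ++ (if p.2 ≠ "" then [p.2] else [])
    ++ (if e = n ∧ p.1 = n - 1 then [","] ++ instrs ++ ["]"] else [])

theorem pvBody_eq (s e n : Int) (instrs : List String) :
    (fun new_tokens (p : Int × String) =>
      let new_tokens := if p.1 = s then new_tokens ++ ["["] else new_tokens
      let new_tokens := if p.1 = e then pvWriteBranchEnd instrs new_tokens else new_tokens
      let new_tokens := if p.2 ≠ "" then new_tokens ++ [p.2] else new_tokens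
      if e = n ∧ p.1 = n - 1 then pvWriteBranchEnd instrs new_tokens else new_tokens)
    = fun acc p => acc ++ pvStep s e n instrs p := by
  funext acc p
  simp only [pvStep, pvWriteBranchEnd_eq]
  split_ifs <;> simp

theorem pvFilterMapEnumNil {β : Type} (f : Int × String → Option β) (l : List String) (k : Int)
    (h : ∀ p : Int × String, k ≤ p.1 → f p = none) :
    (PySem.List.enumerate l k).filterMap f = [] := by
  induction l generalizing k with
  | nil => simp [PySem.List.enumerate]
  | cons t ts ih =>
      simp [PySem.List.enumerate_cons, List.filterMap_cons, h (k, t) le_rfl,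
        ih (k + 1) (fun p hp => h p (by omega))]

theorem pvConsStep (s e n k : Int) (instrs L M R : List String) (t : String)
    (hse : s ≤ e) (hn : k + 1 < n)
    (hL : s ≤ k → L = []) (hM : e ≤ k → M = []) :
    ((if k = s then ["["] else []) ++ (if k = e then [","] ++ instrs ++ ["]"] else [])
        ++ (if t ≠ "" then [t] else [])
        ++ (if e = n ∧ k = n - 1 then [","] ++ instrs ++ ["]"] else []))
      ++ (L ++ (if k + 1 ≤ s ∧ s < n then ["["] else []) ++ M
        ++ (if k + 1 ≤ e ∧ e ≤ n then [","] ++ instrs ++ ["]"] else []) ++ R)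
    = (if k < s ∧ t ≠ "" then [t] else []) ++ L
      ++ (if k ≤ s ∧ s < n then ["["] else [])
      ++ ((if (s ≤ k ∧ k < e) ∧ t ≠ "" then [t] else []) ++ M)
      ++ (if k ≤ e ∧ e ≤ n then [","] ++ instrs ++ ["]"] else [])
      ++ ((if e ≤ k ∧ t ≠ "" then [t] else []) ++ R) := by
  rw [if_neg (show ¬(e = n ∧ k = n - 1) by omega)]
  by_cases hks : s ≤ k
  · rw [hL hks]
    by_cases hke : e ≤ k
    · rw [hM hke]
      by_cases ht : t = "" <;>
        simp only [ht, ne_eq, not_true_eq_false, not_false_eq_true, and_true, and_false,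
          if_true, if_false] <;>
        split_ifs <;> first | omega | (simp; done) | (simp; omega)
    · by_cases ht : t = "" <;>
        simp only [ht, ne_eq, not_true_eq_false, not_false_eq_true, and_true, and_false,
          if_true, if_false] <;>
        split_ifs <;> first | omega | (simp; done) | (simp; omega)
  · by_cases ht : t = "" <;>
      simp only [ht, ne_eq, not_true_eq_false, not_false_eq_true, and_true, and_false,
        if_true, if_false] <;>
      split_ifs <;> first | omega | (simp; done) | (simp; omega)

theorem pvFilterMapIfCons (c : Int × String → Prop) [DecidablePred c]
    (x : Int × String) (xs : List (Int × String)) :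
    (x :: xs).filterMap (fun p => if c p then some p.2 else none)
      = (if c x then [x.2] else []) ++ xs.filterMap (fun p => if c p then some p.2 else none) := by
  simp only [List.filterMap_cons]
  split_ifs <;> simp

theorem pvKey (s e n : Int) (instrs : List String) (hse : s ≤ e)
    (l : List String) (k : Int) (hk : k + l.length = n) :
    (PySem.List.enumerate l k).flatMap (pvStep s e n instrs)
    = (PySem.List.enumerate l k).filterMap (fun p => if p.1 < s ∧ p.2 ≠ "" then some p.2 else none)
      ++ (if k ≤ s ∧ s < n then ["["] else [])
      ++ (PySem.List.enumerate l k).filterMap (fun p => if (s ≤ p.1 ∧ p.1 < e) ∧ p.2 ≠ "" then some p.2 else none)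
      ++ (if l ≠ [] ∧ k ≤ e ∧ e ≤ n then [","] ++ instrs ++ ["]"] else [])
      ++ (PySem.List.enumerate l k).filterMap (fun p => if e ≤ p.1 ∧ p.2 ≠ "" then some p.2 else none) := by
  induction l generalizing k with
  | nil =>
      simp only [List.length_nil, Nat.cast_zero, add_zero] at hk
      simp [PySem.List.enumerate, if_neg (show ¬(k ≤ s ∧ s < n) by omega)]
  | cons t ts ih =>
      simp only [List.length_cons, Nat.cast_add, Nat.cast_one] at hk
      rw [PySem.List.enumerate_cons, List.flatMap_cons, ih (k + 1) (by omega)]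
      by_cases hts : ts = []
      · subst hts
        simp only [List.length_nil, Nat.cast_zero] at hk
        simp only [PySem.List.enumerate, List.flatMap_nil, List.append_nil, pvStep,
          not_true, false_and, if_false]
        rw [show [((k : Int), t)] = ((k, t) :: ([] : List (Int × String))) from rfl,
          pvFilterMapIfCons (fun p => p.1 < s ∧ p.2 ≠ ""),
          pvFilterMapIfCons (fun p => (s ≤ p.1 ∧ p.1 < e) ∧ p.2 ≠ ""),
          pvFilterMapIfCons (fun p => e ≤ p.1 ∧ p.2 ≠ "")]
        simp only [List.filterMap_nil, List.append_nil]
        clear ih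
        split_ifs <;> first | omega | (simp; done) | (simp; omega) | (simp_all; done) | (simp_all; omega)
      · have hlen : 1 ≤ (ts.length : Int) := by
          cases ts with
          | nil => exact absurd rfl hts
          | cons a b => simp
        clear ih
        rw [pvFilterMapIfCons (fun p => p.1 < s ∧ p.2 ≠ ""),
          pvFilterMapIfCons (fun p => (s ≤ p.1 ∧ p.1 < e) ∧ p.2 ≠ ""),
          pvFilterMapIfCons (fun p => e ≤ p.1 ∧ p.2 ≠ "")]
        have hL : s ≤ k → (PySem.List.enumerate ts (k + 1)).filterMap
            (fun p => if p.1 < s ∧ p.2 ≠ "" then some p.2 else none) = [] := fun h =>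
          pvFilterMapEnumNil _ _ _ (fun p hp =>
            if_neg (fun hc => absurd hc.1 (by omega)))
        have hM : e ≤ k → (PySem.List.enumerate ts (k + 1)).filterMap
            (fun p => if (s ≤ p.1 ∧ p.1 < e) ∧ p.2 ≠ "" then some p.2 else none) = [] := fun h =>
          pvFilterMapEnumNil _ _ _ (fun p hp =>
            if_neg (fun hc => absurd hc.1.2 (by omega)))
        have key := pvConsStep s e n k instrs
          ((PySem.List.enumerate ts (k + 1)).filterMap (fun p => if p.1 < s ∧ p.2 ≠ "" then some p.2 else none))
          ((PySem.List.enumerate ts (k + 1)).filterMap (fun p => if (s ≤ p.1 ∧ p.1 < e) ∧ p.2 ≠ "" then some p.2 else none))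
          ((PySem.List.enumerate ts (k + 1)).filterMap (fun p => if e ≤ p.1 ∧ p.2 ≠ "" then some p.2 else none))
          t hse (by omega) hL hM
        simp only [ne_eq, List.cons_ne_nil, not_false_eq_true, true_and, hts, pvStep,
          List.append_assoc] at key ⊢
        exact key

-- ===== VERDICT (by name: the statement is the Claim_ definition above) =====
theorem insert_branch_tokens_py_spec : Claim_equal_insert_branch_tokens_py := by
  intro original_tokens s e instrs _ hpre
  unfold Spec_insert_branch_tokens_py insert_branch_tokens_py insert_branch_tokens_py_alt
  rw [if_neg (not_lt.mpr hpre), if_neg (not_lt.mpr hpre)]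
  by_cases h0 : original_tokens = [] <;>
    simp only [h0, if_true, if_false, ite_true, ite_false] <;>
    rw [pvBody_eq, PySem.List.foldl_append_eq_flatMap, List.nil_append,
      pvKey _ _ _ _ hpre _ 0 (by simp)]
  · simp
  · simp [h0]
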